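-- pv_equiv track=rewrite | github.com/AmDumDee/rossetacode | python/Cyclotomic_polynomial.py | cyclotomic
-- ===== SOURCE A (Python) =====
-- from itertools import count, chain
--
-- def primes(_cache=[2, 3]):
--     yield from _cache
--     for n in count(_cache[-1]+2, 2):
--         if isprime(n):
--             _cache.append(n)
--             yield n
--
-- def isprime(n):
--     for p in primes():
--         if n%p == 0:
--             return False
--         if p*p > n:
--             return True
--
-- def factors(n):
--     for p in primes():
--
--         if p*p > n:
--             if n > 1:
--                 yield(n, 1, 1)
--             break
--
--         if n%p == 0:
--             cnt = 0
--             while True: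
--                 n, cnt = n//p, cnt+1
--                 if n%p != 0: break
--             yield p, cnt, n
--
-- def cyclotomic(n):
--     def poly_div(num, den):
--         return (num[0] + den[1], num[1] + den[0])
--
--     def elevate(poly, n):
--         powerup = lambda p, n: [a*n for a in p]
--         return poly if n == 1 else (powerup(poly[0], n), powerup(poly[1], n))
--
--
--     if n == 0:
--         return ([], [])
--     if n == 1:
--         return ([1], [])
--
--     p, m, r = next(factors(n))
--     poly = cyclotomic(r)
--     return elevate(poly_div(elevate(poly, p), poly), p**(m-1))
-- ===== SOURCE B (Python) =====
-- def cyclotomic(n):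
--     def poly_div(num, den):
--         return (num[0] + den[1], num[1] + den[0])
--
--     def elevate(poly, k):
--         return poly if k == 1 else ([a*k for a in poly[0]], [a*k for a in poly[1]])
--
--     if n == 0:
--         return ([], [])
--     # factor n up front, smallest prime first
--     fs = []
--     p = 2
--     while p * p <= n:
--         if n % p == 0:
--             cnt = 0
--             while n % p == 0:
--                 n //= p
--                 cnt += 1
--             fs.append((p, cnt))
--         p += 1
--     if n > 1:
--         fs.append((n, 1))
--     poly = ([1], [])
--     for p, m in reversed(fs):
--         poly = elevate(poly_div(elevate(poly, p), poly), p ** (m - 1))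
--     return poly
-- ===== Notes on version B (the rewrite author's own statement) =====
-- stated objective: alternative
-- what changed: A recursively peels one prime per call using a cached prime generator (primes/isprime/factors); B factors n completely up front by plain trial division and then builds the polynomial iteratively by folding the elevate/poly_div step over the factor list in reverse order.
import Mathlib
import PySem

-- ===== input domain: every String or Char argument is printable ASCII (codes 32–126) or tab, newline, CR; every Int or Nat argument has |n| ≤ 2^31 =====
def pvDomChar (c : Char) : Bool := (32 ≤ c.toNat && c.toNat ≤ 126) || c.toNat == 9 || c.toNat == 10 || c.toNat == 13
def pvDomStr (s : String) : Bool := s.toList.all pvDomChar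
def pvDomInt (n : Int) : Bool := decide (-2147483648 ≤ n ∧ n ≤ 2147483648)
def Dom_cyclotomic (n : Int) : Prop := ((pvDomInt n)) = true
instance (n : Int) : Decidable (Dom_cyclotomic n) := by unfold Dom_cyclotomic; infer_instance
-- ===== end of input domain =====

-- B replaces A's recursion (which peels one prime per call via a cached prime generator) by a single
-- up-front trial-division factorisation followed by an iterative fold over the factor list; objective: alternative.

-- ===== PORT A =====
def pvPolyDivA (num den : List Int × List Int) : List Int × List Int :=
  (num.1 ++ den.2, num.2 ++ den.1)

def pvPowerupA (p : List Int) (k : Int) : List Int := p.map (fun a => a * k)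

def pvElevateA (poly : List Int × List Int) (k : Int) : List Int × List Int :=
  if k = 1 then poly else (pvPowerupA poly.1 k, pvPowerupA poly.2 k)

-- inner do-while of factors(): "n, cnt = n//p, cnt+1; if n%p != 0: break"; fuel only makes it total,
-- fuel n.toNat is never exhausted on the calls the ports make
def pvDivOutA : Nat → Int → Int → Int → Int × Int
  | 0, _, n, cnt => (n, cnt)
  | f+1, p, n, cnt =>
      let n' := PySem.Int.floordiv n p
      if PySem.Int.mod n' p ≠ 0 then (n', cnt + 1) else pvDivOutA f p n' (cnt + 1)

-- next(factors(n)): scan p over the values A's primes() generator yields: 2, 3, then odd candidates.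
-- Exact: an odd composite candidate never divides the reduced n (a smaller prime would have), and the
-- p*p > n break yields the same triple, so scanning 2,3,5,7,9,… returns what scanning the primes returns.
def pvFirstFacA : Nat → Int → Int → Option (Int × Int × Int)
  | 0, _, _ => none
  | f+1, p, n =>
      if p * p > n then (if n > 1 then some (n, 1, 1) else none)
      else if PySem.Int.mod n p = 0 then
        some (p, (pvDivOutA n.toNat p n 0).2, (pvDivOutA n.toNat p n 0).1)
      else pvFirstFacA f (if p = 2 then 3 else p + 2) n

-- cyclotomic(n) itself, fuel = recursion depth bound (each call strictly shrinks n);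
-- the 'none' arm is unreachable for n ≥ 2 (Python raises StopIteration only for negative n, outside Pre_)
def pvCycA : Nat → Int → List Int × List Int
  | 0, _ => ([], [])
  | f+1, n =>
      if n = 0 then ([], [])
      else if n = 1 then ([1], [])
      else
        match pvFirstFacA (n.toNat + 1) 2 n with
        | none => ([], [])
        | some (p, m, r) =>
            pvElevateA (pvPolyDivA (pvElevateA (pvCycA f r) p) (pvCycA f r)) (p ^ (m - 1).toNat)

def cyclotomic (n : Int) : List Int × List Int := pvCycA (n.toNat + 1) n

-- ===== PORT B =====
def pvPolyDivB (num den : List Int × List Int) : List Int × List Int :=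
  (num.1 ++ den.2, num.2 ++ den.1)

def pvElevateB (poly : List Int × List Int) (k : Int) : List Int × List Int :=
  if k = 1 then poly else (poly.1.map (fun a => a * k), poly.2.map (fun a => a * k))

-- inner while of B: "while n % p == 0: n //= p; cnt += 1" (fuel n.toNat, never exhausted on B's calls)
def pvDivOutB : Nat → Int → Int → Int → Int × Int
  | 0, _, n, cnt => (n, cnt)
  | f+1, p, n, cnt =>
      if PySem.Int.mod n p = 0 then pvDivOutB f p (PySem.Int.floordiv n p) (cnt + 1)
      else (n, cnt)

-- B's trial-division loop: "while p*p <= n: …; p += 1", then append (n,1) if n > 1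
def pvFacB : Nat → Int → Int → List (Int × Int) → List (Int × Int)
  | 0, _, _, acc => acc
  | f+1, p, n, acc =>
      if p * p ≤ n then
        if PySem.Int.mod n p = 0 then
          pvFacB f (p + 1) (pvDivOutB n.toNat p n 0).1 (acc ++ [(p, (pvDivOutB n.toNat p n 0).2)])
        else pvFacB f (p + 1) n acc
      else acc ++ (if n > 1 then [(n, 1)] else [])

def pvStepB (poly : List Int × List Int) (pm : Int × Int) : List Int × List Int :=
  pvElevateB (pvPolyDivB (pvElevateB poly pm.1) poly) (pm.1 ^ (pm.2 - 1).toNat)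

def cyclotomic_alt (n : Int) : List Int × List Int :=
  if n = 0 then ([], [])
  else ((pvFacB (n.toNat + 1) 2 n []).reverse).foldl pvStepB ([1], [])

-- ===== PRECONDITION & SPEC =====
-- Pre_ excludes exactly the negative inputs, where A's next(factors(n)) raises StopIteration (no factor is yielded).
def Pre_cyclotomic (n : Int) : Prop := 0 ≤ n
instance (n : Int) : Decidable (Pre_cyclotomic n) := by unfold Pre_cyclotomic; infer_instance
def pvWitness_cyclotomic : Int := (12)

def Spec_cyclotomic (n : Int) (out : List Int × List Int) : Prop := out = cyclotomic_alt n
instance (n : Int) (out : List Int × List Int) : Decidable (Spec_cyclotomic n out) := by unfold Spec_cyclotomic; infer_instance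

-- ===== CLAIM (what is proved, stated in full; the proofs are below) =====
def Claim_equal_cyclotomic : Prop := ∀ (n : Int), Dom_cyclotomic n → Pre_cyclotomic n → Spec_cyclotomic n (cyclotomic n)

-- ===== LEMMAS AND PROOFS =====

theorem pvDivOutA_step (f : Nat) (p n c : Int) :
    pvDivOutA (f+1) p n c =
      if PySem.Int.mod (PySem.Int.floordiv n p) p ≠ 0 then (PySem.Int.floordiv n p, c + 1)
      else pvDivOutA f p (PySem.Int.floordiv n p) (c + 1) := rfl

theorem pvDivOutB_step (f : Nat) (p n c : Int) :
    pvDivOutB (f+1) p n c =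
      if PySem.Int.mod n p = 0 then pvDivOutB f p (PySem.Int.floordiv n p) (c + 1)
      else (n, c) := rfl

theorem pv_divOut_spec : ∀ (K : Nat) (p n c : Int) (f : Nat), n.toNat ≤ K → 2 ≤ p → 1 ≤ n →
    p ∣ n → n.toNat ≤ f →
    ∃ m r, 1 ≤ m ∧ 1 ≤ r ∧ r < n ∧ r ∣ n ∧ ¬ p ∣ r ∧
      pvDivOutA f p n c = (r, c + m) ∧ pvDivOutB f p n c = (r, c + m) := by
  intro K
  induction K with
  | zero => intro p n c f hK hp hn _ _; omega
  | succ K ih =>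
    intro p n c f hK hp hn hdvd hf
    have hp0 : (0:Int) < p := by omega
    have hn2 : 2 ≤ n := by
      obtain ⟨k, rfl⟩ := hdvd
      have hk : 1 ≤ k := by nlinarith
      nlinarith
    obtain ⟨f', rfl⟩ : ∃ f', f = f' + 1 := ⟨f - 1, by omega⟩
    have hf1 : 1 ≤ f' := by omega
    obtain ⟨g, rfl⟩ : ∃ g, f' = g + 1 := ⟨f' - 1, by omega⟩
    have hfd : PySem.Int.floordiv n p = n / p := PySem.Int.floordiv_eq_ediv_of_pos hp0
    generalize hn' : PySem.Int.floordiv n p = n' at *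
    have hmul : n' * p = n := by
      rw [hfd]; exact Int.ediv_mul_cancel hdvd
    have hn'1 : 1 ≤ n' := by nlinarith
    have hn'lt : n' < n := by nlinarith
    have hn'dvd : n' ∣ n := ⟨p, by linarith [hmul.symm]⟩
    have hBstep : pvDivOutB (g + 1 + 1) p n c = pvDivOutB (g + 1) p n' (c + 1) := by
      rw [pvDivOutB_step, if_pos ((PySem.Int.mod_eq_zero_iff_dvd n p).2 hdvd), hn']
    by_cases hpn' : p ∣ n'
    · -- recurse
      obtain ⟨m, r, hm, hr1, hrlt, hrdvd, hpr, hA, hB⟩ :=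
        ih p n' (c+1) (g+1) (by omega) hp hn'1 hpn' (by omega)
      refine ⟨m + 1, r, by omega, hr1, by omega, hrdvd.trans hn'dvd, hpr, ?_, ?_⟩
      · rw [pvDivOutA_step, hn',
          if_neg (by simp [(PySem.Int.mod_eq_zero_iff_dvd n' p).2 hpn']), hA]
        ring_nf
      · rw [hBstep, hB]; ring_nf
    · -- one division
      have hmod : PySem.Int.mod n' p ≠ 0 := by
        simp [PySem.Int.mod_eq_zero_iff_dvd]; exact hpn'
      refine ⟨1, n', le_rfl, hn'1, hn'lt, hn'dvd, hpn', ?_, ?_⟩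
      · rw [pvDivOutA_step, hn', if_pos hmod]
      · rw [hBstep, pvDivOutB_step, if_neg (by simpa using hmod)]

theorem pvFacB_step (f : Nat) (p n : Int) (acc : List (Int × Int)) :
    pvFacB (f+1) p n acc =
      if p * p ≤ n then
        if PySem.Int.mod n p = 0 then
          pvFacB f (p + 1) (pvDivOutB n.toNat p n 0).1 (acc ++ [(p, (pvDivOutB n.toNat p n 0).2)])
        else pvFacB f (p + 1) n acc
      else acc ++ (if n > 1 then [(n, 1)] else []) := rfl

theorem pv_facB_acc : ∀ (f : Nat) (p n : Int) (acc : List (Int × Int)),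
    pvFacB f p n acc = acc ++ pvFacB f p n [] := by
  intro f
  induction f with
  | zero => intro p n acc; simp [pvFacB]
  | succ f ih =>
    intro p n acc
    rw [pvFacB_step, pvFacB_step]
    by_cases h1 : p * p ≤ n
    · rw [if_pos h1, if_pos h1]
      by_cases h2 : PySem.Int.mod n p = 0
      · rw [if_pos h2, if_pos h2, ih (p+1) _ (acc ++ _), ih (p+1) _ ([] ++ _)]; simp
      · rw [if_neg h2, if_neg h2]; exact ih (p+1) n acc
    · rw [if_neg h1, if_neg h1]; simp

-- both fuels ≥ max((n+2-p).toNat, 1) ⇒ same result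
theorem pv_facB_fuel : ∀ (K : Nat) (p n : Int) (acc : List (Int × Int)) (f f' : Nat),
    (n + 2 - p).toNat ≤ K → 2 ≤ p → 1 ≤ n →
    (n + 2 - p).toNat ≤ f → (n + 2 - p).toNat ≤ f' → 1 ≤ f → 1 ≤ f' →
    pvFacB f p n acc = pvFacB f' p n acc := by
  intro K
  induction K with
  | zero =>
    intro p n acc f f' hK hp hn hf hf' hf1 hf1'
    have hple : p ≤ p * p := le_mul_of_one_le_left (by omega) (by omega)
    have hpp : ¬ p * p ≤ n := by omega
    obtain ⟨g, rfl⟩ : ∃ g, f = g + 1 := ⟨f - 1, by omega⟩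
    obtain ⟨g', rfl⟩ : ∃ g', f' = g' + 1 := ⟨f' - 1, by omega⟩
    rw [pvFacB_step, pvFacB_step, if_neg hpp, if_neg hpp]
  | succ K ih =>
    intro p n acc f f' hK hp hn hf hf' hf1 hf1'
    obtain ⟨g, rfl⟩ : ∃ g, f = g + 1 := ⟨f - 1, by omega⟩
    obtain ⟨g', rfl⟩ : ∃ g', f' = g' + 1 := ⟨f' - 1, by omega⟩
    rw [pvFacB_step, pvFacB_step]
    by_cases hpp : p * p ≤ n
    · have hpltn : p < n := by nlinarith
      rw [if_pos hpp, if_pos hpp]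
      by_cases hd : PySem.Int.mod n p = 0
      · rw [if_pos hd, if_pos hd]
        have hdvd : p ∣ n := (PySem.Int.mod_eq_zero_iff_dvd n p).1 hd
        obtain ⟨m, r, _, hr1, hrlt, _, _, _, hB⟩ :=
          pv_divOut_spec n.toNat p n 0 n.toNat le_rfl hp hn hdvd le_rfl
        rw [hB]
        exact ih (p+1) r _ g g' (by omega) (by omega) hr1 (by omega) (by omega)
          (by omega) (by omega)
      · rw [if_neg hd, if_neg hd]
        exact ih (p+1) n acc g g' (by omega) (by omega) hn (by omega) (by omega)
          (by omega) (by omega)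
    · rw [if_neg hpp, if_neg hpp]

theorem pv_facB_skip : ∀ (K : Nat) (a b n : Int) (acc : List (Int × Int)) (f f' : Nat),
    (b - a).toNat ≤ K → 2 ≤ a → a ≤ b → 1 ≤ n →
    (∀ d : Int, 2 ≤ d → a ≤ d → d < b → ¬ d ∣ n) →
    (n + 2 - a).toNat ≤ f → (n + 2 - b).toNat ≤ f' → 1 ≤ f → 1 ≤ f' →
    pvFacB f a n acc = pvFacB f' b n acc := by
  intro K
  induction K with
  | zero =>
    intro a b n acc f f' hK ha hab hn hnd hf hf' h1 h1'
    have : a = b := by omega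
    subst this
    exact pv_facB_fuel (n + 2 - a).toNat a n acc f f' le_rfl ha hn hf hf' h1 h1'
  | succ K ih =>
    intro a b n acc f f' hK ha hab hn hnd hf hf' h1 h1'
    by_cases hb : a = b
    · subst hb
      exact pv_facB_fuel (n + 2 - a).toNat a n acc f f' le_rfl ha hn hf hf' h1 h1'
    have haltb : a < b := by omega
    by_cases hpp : a * a ≤ n
    · have haltn : a < n := by nlinarith
      obtain ⟨g, rfl⟩ : ∃ g, f = g + 1 := ⟨f - 1, by omega⟩
      have hmod : ¬ PySem.Int.mod n a = 0 := by
        simp only [PySem.Int.mod_eq_zero_iff_dvd]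
        exact hnd a ha le_rfl haltb
      rw [pvFacB_step, if_pos hpp, if_neg hmod]
      exact ih (a+1) b n acc g f' (by omega) (by omega) (by omega) hn
        (fun d h2 had hdb => hnd d h2 (by omega) hdb) (by omega) hf' (by omega) h1'
    · -- a*a > n: both sides terminal (b ≥ a so b*b > n too)
      have hbb : ¬ b * b ≤ n := by nlinarith
      obtain ⟨g, rfl⟩ : ∃ g, f = g + 1 := ⟨f - 1, by omega⟩
      obtain ⟨g', rfl⟩ : ∃ g', f' = g' + 1 := ⟨f' - 1, by omega⟩
      rw [pvFacB_step, pvFacB_step, if_neg hpp, if_neg hbb]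

theorem pv_facB_large : ∀ (K : Nat) (a n : Int) (acc : List (Int × Int)) (f : Nat),
    (n + 3 - a).toNat ≤ K → 2 ≤ a → 2 ≤ n →
    (∀ d : Int, 2 ≤ d → d * d ≤ n → ¬ d ∣ n) →
    (n + 3 - a).toNat ≤ f → 1 ≤ f →
    pvFacB f a n acc = acc ++ [(n, 1)] := by
  intro K
  induction K with
  | zero =>
    intro a n acc f hK ha hn hnd hf h1
    have hale : a ≤ a * a := le_mul_of_one_le_left (by omega) (by omega)
    have hpp : ¬ a * a ≤ n := by omega
    obtain ⟨g, rfl⟩ : ∃ g, f = g + 1 := ⟨f - 1, by omega⟩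
    rw [pvFacB_step, if_neg hpp, if_pos (by omega)]
  | succ K ih =>
    intro a n acc f hK ha hn hnd hf h1
    obtain ⟨g, rfl⟩ : ∃ g, f = g + 1 := ⟨f - 1, by omega⟩
    rw [pvFacB_step]
    by_cases hpp : a * a ≤ n
    · have haltn : a < n := by nlinarith
      have hmod : ¬ PySem.Int.mod n a = 0 := by
        simp only [PySem.Int.mod_eq_zero_iff_dvd]
        exact hnd a ha hpp
      rw [if_pos hpp, if_neg hmod]
      exact ih (a+1) n acc g (by omega) (by omega) hn hnd (by omega) (by omega)
    · rw [if_neg hpp, if_pos (by omega)]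

theorem pv_facB_find_at : ∀ (p n : Int) (acc : List (Int × Int)) (f : Nat),
    2 ≤ p → 1 ≤ n → p ∣ n → p * p ≤ n →
    (∀ d : Int, 2 ≤ d → d < p → ¬ d ∣ n) →
    (n + 3 - p).toNat ≤ f →
    pvFacB f p n acc =
      acc ++ (p, (pvDivOutB n.toNat p n 0).2) ::
        pvFacB (((pvDivOutB n.toNat p n 0).1).toNat + 1) 2 (pvDivOutB n.toNat p n 0).1 [] := by
  intro p n acc f hp hn hdvd hpp hmin hf
  have hpltn : p < n := by nlinarith
  obtain ⟨g, rfl⟩ : ∃ g, f = g + 1 := ⟨f - 1, by omega⟩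
  rw [pvFacB_step, if_pos hpp, if_pos ((PySem.Int.mod_eq_zero_iff_dvd n p).2 hdvd)]
  obtain ⟨m, r, _, hr1, hrlt, hrdvd, hpr, _, hB⟩ :=
    pv_divOut_spec n.toNat p n 0 n.toNat le_rfl hp hn hdvd le_rfl
  rw [hB]
  rw [pv_facB_acc g (p+1) r (acc ++ _)]
  rw [← pv_facB_skip (p + 1 - 2).toNat 2 (p+1) r [] (r.toNat + 1) g le_rfl le_rfl
    (by omega) hr1
    (fun d h2 _ hdb hdr => by
      by_cases hlt : d < p
      · exact hmin d h2 hlt (hdr.trans hrdvd)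
      · have : d = p := by omega
        subst this
        exact hpr hdr)
    (by omega) (by omega) (by omega) (by omega)]
  simp

theorem pv_facB_find : ∀ (K : Nat) (a p n : Int) (acc : List (Int × Int)) (f : Nat),
    (p - a).toNat ≤ K → 2 ≤ a → a ≤ p → 1 ≤ n →
    p ∣ n → p * p ≤ n → (∀ d : Int, 2 ≤ d → d < p → ¬ d ∣ n) →
    (n + 3 - a).toNat ≤ f →
    pvFacB f a n acc =
      acc ++ (p, (pvDivOutB n.toNat p n 0).2) ::
        pvFacB (((pvDivOutB n.toNat p n 0).1).toNat + 1) 2 (pvDivOutB n.toNat p n 0).1 [] := by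
  intro K
  induction K with
  | zero =>
    intro a p n acc f hK ha hap hn hdvd hpp hmin hf
    have : a = p := by omega
    subst this
    exact pv_facB_find_at a n acc f ha hn hdvd hpp hmin hf
  | succ K ih =>
    intro a p n acc f hK ha hap hn hdvd hpp hmin hf
    by_cases hb : a = p
    · subst hb
      exact pv_facB_find_at a n acc f ha hn hdvd hpp hmin hf
    have haltp : a < p := by omega
    have haltn : a < n := by nlinarith
    obtain ⟨g, rfl⟩ : ∃ g, f = g + 1 := ⟨f - 1, by omega⟩
    have hmod : ¬ PySem.Int.mod n a = 0 := by
      simp only [PySem.Int.mod_eq_zero_iff_dvd]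
      exact hmin a ha haltp
    rw [pvFacB_step, if_pos (by nlinarith), if_neg hmod]
    exact ih (a+1) p n acc g (by omega) (by omega) (by omega) hn hdvd hpp hmin (by omega)

theorem pvFirstFacA_step (f : Nat) (p n : Int) :
    pvFirstFacA (f+1) p n =
      if p * p > n then (if n > 1 then some (n, 1, 1) else none)
      else if PySem.Int.mod n p = 0 then
        some (p, (pvDivOutA n.toNat p n 0).2, (pvDivOutA n.toNat p n 0).1)
      else pvFirstFacA f (if p = 2 then 3 else p + 2) n := rfl

theorem pv_firstFacA_find : ∀ (K : Nat) (a p n : Int) (f : Nat),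
    (p - a).toNat ≤ K → (a = 2 ∨ (3 ≤ a ∧ a % 2 = 1)) → 2 ≤ a → a ≤ p → 1 ≤ n →
    p ∣ n → p * p ≤ n → (∀ d : Int, 2 ≤ d → d < p → ¬ d ∣ n) →
    (n + 3 - a).toNat ≤ f →
    pvFirstFacA f a n = some (p, (pvDivOutA n.toNat p n 0).2, (pvDivOutA n.toNat p n 0).1) := by
  intro K
  induction K with
  | zero =>
    intro a p n f hK hseq ha hap hn hdvd hpp hmin hf
    have : a = p := by omega
    subst this
    have haltn : a < n := by nlinarith
    obtain ⟨g, rfl⟩ : ∃ g, f = g + 1 := ⟨f - 1, by omega⟩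
    rw [pvFirstFacA_step, if_neg (by omega), if_pos ((PySem.Int.mod_eq_zero_iff_dvd n a).2 hdvd)]
  | succ K ih =>
    intro a p n f hK hseq ha hap hn hdvd hpp hmin hf
    by_cases hb : a = p
    · subst hb
      have haltn : a < n := by nlinarith
      obtain ⟨g, rfl⟩ : ∃ g, f = g + 1 := ⟨f - 1, by omega⟩
      rw [pvFirstFacA_step, if_neg (by omega), if_pos ((PySem.Int.mod_eq_zero_iff_dvd n a).2 hdvd)]
    have haltp : a < p := by omega
    have haltn : a < n := by nlinarith
    -- p is odd unless p = 2 (impossible here): a < p and 2 ∣ p would give 2 ∣ n with 2 < p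
    have hpodd : p % 2 = 1 := by
      rcases Int.emod_two_eq p with h | h
      · exfalso
        have h2 : (2:Int) ∣ p := Int.dvd_of_emod_eq_zero h
        exact hmin 2 le_rfl (by omega) (h2.trans hdvd)
      · exact h
    obtain ⟨g, rfl⟩ : ∃ g, f = g + 1 := ⟨f - 1, by omega⟩
    have hmod : ¬ PySem.Int.mod n a = 0 := by
      simp only [PySem.Int.mod_eq_zero_iff_dvd]
      exact hmin a ha haltp
    rw [pvFirstFacA_step, if_neg (by nlinarith), if_neg hmod]
    by_cases h2 : a = 2
    · subst h2
      rw [if_pos rfl]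
      exact ih 3 p n g (by omega) (Or.inr (by omega)) (by omega) (by omega) hn hdvd hpp hmin
        (by omega)
    · rw [if_neg h2]
      have hodd : 3 ≤ a ∧ a % 2 = 1 := hseq.resolve_left h2
      exact ih (a+2) p n g (by omega) (Or.inr (by omega)) (by omega) (by omega) hn hdvd hpp hmin
        (by omega)

theorem pv_firstFacA_large : ∀ (K : Nat) (a n : Int) (f : Nat),
    (n + 3 - a).toNat ≤ K → (a = 2 ∨ (3 ≤ a ∧ a % 2 = 1)) → 2 ≤ a → 2 ≤ n →
    (∀ d : Int, 2 ≤ d → d * d ≤ n → ¬ d ∣ n) →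
    (n + 3 - a).toNat ≤ f → 1 ≤ f →
    pvFirstFacA f a n = some (n, 1, 1) := by
  intro K
  induction K with
  | zero =>
    intro a n f hK hseq ha hn hnd hf h1
    have hale : a ≤ a * a := le_mul_of_one_le_left (by omega) (by omega)
    have hpp : ¬ a * a ≤ n := by omega
    obtain ⟨g, rfl⟩ : ∃ g, f = g + 1 := ⟨f - 1, by omega⟩
    rw [pvFirstFacA_step, if_pos (by omega), if_pos (by omega)]
  | succ K ih =>
    intro a n f hK hseq ha hn hnd hf h1
    obtain ⟨g, rfl⟩ : ∃ g, f = g + 1 := ⟨f - 1, by omega⟩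
    rw [pvFirstFacA_step]
    by_cases hpp : a * a ≤ n
    · have haltn : a < n := by nlinarith
      have hmod : ¬ PySem.Int.mod n a = 0 := by
        simp only [PySem.Int.mod_eq_zero_iff_dvd]
        exact hnd a ha hpp
      rw [if_neg (by omega), if_neg hmod]
      by_cases h2 : a = 2
      · subst h2
        rw [if_pos rfl]
        exact ih 3 n g (by omega) (Or.inr (by omega)) (by omega) hn hnd (by omega) (by omega)
      · rw [if_neg h2]
        have hodd : 3 ≤ a ∧ a % 2 = 1 := hseq.resolve_left h2
        exact ih (a+2) n g (by omega) (Or.inr (by omega)) (by omega) hn hnd (by omega) (by omega)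
    · rw [if_pos (by omega), if_pos (by omega)]

theorem pvCycA_step (f : Nat) (n : Int) :
    pvCycA (f+1) n =
      if n = 0 then ([], [])
      else if n = 1 then ([1], [])
      else
        match pvFirstFacA (n.toNat + 1) 2 n with
        | none => ([], [])
        | some (p, m, r) =>
            pvElevateA (pvPolyDivA (pvElevateA (pvCycA f r) p) (pvCycA f r)) (p ^ (m - 1).toNat)
    := rfl

theorem pv_factor_cons : ∀ (n : Int), 2 ≤ n →
    ∃ p m r, 1 ≤ m ∧ 1 ≤ r ∧ r < n ∧
      pvFirstFacA (n.toNat + 1) 2 n = some (p, m, r) ∧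
      pvFacB (n.toNat + 1) 2 n [] = (p, m) :: pvFacB (r.toNat + 1) 2 r [] := by
  intro n hn
  have hn0 : (0:Int) ≤ n := by omega
  have hNcast : ((n.toNat : Int)) = n := Int.toNat_of_nonneg hn0
  have hN2 : 2 ≤ n.toNat := by omega
  set p : Int := (n.toNat.minFac : Int) with hpdef
  have hp2 : 2 ≤ p := by
    have h := (Nat.minFac_prime (by omega : n.toNat ≠ 1)).two_le
    rw [hpdef]; exact_mod_cast h
  have hpdvd : p ∣ n := by
    rw [hpdef, ← hNcast]
    exact_mod_cast Nat.minFac_dvd n.toNat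
  have hmin : ∀ d : Int, 2 ≤ d → d < p → ¬ d ∣ n := by
    intro d h2 hdp hddvd
    have hd0 : (0:Int) ≤ d := by omega
    have : d.toNat ∣ n.toNat := by
      have := hddvd
      rw [← hNcast, ← Int.toNat_of_nonneg hd0] at this
      exact_mod_cast this
    have hle := Nat.minFac_le_of_dvd (by omega) this
    omega
  have hfuel : (n + 3 - 2).toNat ≤ n.toNat + 1 := by omega
  by_cases hpp : p * p ≤ n
  · obtain ⟨m, r, hm, hr1, hrlt, _, _, hA, hB⟩ :=
      pv_divOut_spec n.toNat p n 0 n.toNat le_rfl hp2 (by omega) hpdvd le_rfl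
    refine ⟨p, m, r, hm, hr1, hrlt, ?_, ?_⟩
    · rw [pv_firstFacA_find (p - 2).toNat 2 p n (n.toNat + 1) le_rfl (Or.inl rfl) le_rfl hp2
        (by omega) hpdvd hpp hmin hfuel, hA]
      simp
    · rw [pv_facB_find (p - 2).toNat 2 p n [] (n.toNat + 1) le_rfl le_rfl hp2 (by omega)
        hpdvd hpp hmin hfuel, hB]
      simp
  · have hnd : ∀ d : Int, 2 ≤ d → d * d ≤ n → ¬ d ∣ n := by
      intro d h2 hdd hddvd
      have hd0 : (0:Int) ≤ d := by omega
      have hdN : d.toNat ∣ n.toNat := by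
        have := hddvd
        rw [← hNcast, ← Int.toNat_of_nonneg hd0] at this
        exact_mod_cast this
      have hle := Nat.minFac_le_of_dvd (by omega) hdN
      have hpd : p ≤ d := by omega
      exact hpp (by nlinarith)
    refine ⟨n, 1, 1, le_rfl, le_rfl, by omega, ?_, ?_⟩
    · exact pv_firstFacA_large (n.toNat + 1) 2 n (n.toNat + 1) (by omega) (Or.inl rfl) le_rfl
        hn hnd (by omega) (by omega)
    · rw [pv_facB_large (n.toNat + 1) 2 n [] (n.toNat + 1) (by omega) le_rfl hn hnd
        (by omega) (by omega)]
      have h1 : pvFacB (Int.toNat 1 + 1) 2 1 [] = [] := by decide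
      rw [h1]
      simp
  
theorem pv_step_eq (poly : List Int × List Int) (p m : Int) :
    pvElevateA (pvPolyDivA (pvElevateA poly p) poly) (p ^ (m - 1).toNat) = pvStepB poly (p, m) := by
  simp [pvElevateA, pvElevateB, pvPowerupA, pvPolyDivA, pvPolyDivB, pvStepB]

theorem pv_main : ∀ (K : Nat) (n : Int) (f : Nat), n.toNat ≤ K → 0 ≤ n → n.toNat + 1 ≤ f →
    pvCycA f n = cyclotomic_alt n := by
  intro K
  induction K with
  | zero =>
    intro n f hK hn hf
    have : n = 0 := by omega
    subst this
    obtain ⟨g, rfl⟩ : ∃ g, f = g + 1 := ⟨f - 1, by omega⟩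
    rw [pvCycA_step, if_pos rfl]
    simp [cyclotomic_alt]
  | succ K ih =>
    intro n f hK hn hf
    obtain ⟨g, rfl⟩ : ∃ g, f = g + 1 := ⟨f - 1, by omega⟩
    rw [pvCycA_step]
    by_cases h0 : n = 0
    · rw [if_pos h0]; subst h0; simp [cyclotomic_alt]
    rw [if_neg h0]
    by_cases h1 : n = 1
    · rw [if_pos h1]; subst h1
      have h2 : pvFacB ((1:Int).toNat + 1) 2 1 [] = [] := by decide
      rw [show cyclotomic_alt 1 = ((pvFacB ((1:Int).toNat + 1) 2 1 []).reverse).foldl pvStepB ([1], [])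
        from by rw [cyclotomic_alt, if_neg (by omega)], h2]
      simp
    rw [if_neg h1]
    have hn2 : 2 ≤ n := by omega
    obtain ⟨p, m, r, hm, hr1, hrlt, hA, hB⟩ := pv_factor_cons n hn2
    rw [hA]
    have hIH : pvCycA g r = cyclotomic_alt r :=
      ih r g (by omega) (by omega) (by omega)
    show pvElevateA (pvPolyDivA (pvElevateA (pvCycA g r) p) (pvCycA g r))
        (p ^ (m - 1).toNat) = cyclotomic_alt n
    rw [hIH, pv_step_eq]
    have haltr : cyclotomic_alt r = ((pvFacB (r.toNat + 1) 2 r []).reverse).foldl pvStepB ([1], []) := by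
      rw [cyclotomic_alt, if_neg (by omega)]
    rw [haltr]
    rw [show cyclotomic_alt n = ((pvFacB (n.toNat + 1) 2 n []).reverse).foldl pvStepB ([1], [])
      from by rw [cyclotomic_alt, if_neg (by omega)]]
    rw [hB]
    simp [List.foldl_append]

-- ===== VERDICT (by name: the statement is the Claim_ definition above) =====
theorem cyclotomic_spec : Claim_equal_cyclotomic := by
  intro n _ hpre
  show cyclotomic n = cyclotomic_alt n
  exact pv_main n.toNat n (n.toNat + 1) le_rfl hpre le_rfl
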